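-- pv_equiv track=rewrite | github.com/garrettkinman/ECSE-325-Lab | Lab 2/bits.py | find_output_length
-- ===== SOURCE A (Python) =====
-- def find_output_length(x_list, y_list):
--     # mac holds the value of the multiply-accumulate operation
--     # word_length holds the value of the word length required to represent mac
--     # fractional_length holds the value of the fractional length required to represent mac
--     mac = 0
--     word_length = 0
--     fractional_length = 0
--     for i in range(len(x_list)):
--         mac += (x_list[i][0] * y_list[i][0])
--
--         # find the word and fractional lengths for the x(i)*y(i) product
--         temp_length = (x_list[i][1] + y_list[i][1], x_list[i][2] + y_list[i][2])
--
--         # find the word and fractional lengths for the addition of the above product and the old mac value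
--         word_length = max((temp_length[0], word_length)) + 1
--         fractional_length = max((temp_length[1], fractional_length))
--
--     return (mac, word_length, fractional_length)
-- ===== SOURCE B (Python) =====
-- def find_output_length(x_list, y_list):
--     # zip-based staged reductions; word length via its closed form:
--     # w_n = max(n, max_i(t_i + n - i)), offsets supplied by range(n, 0, -1)
--     n = len(x_list)
--     mac = sum(a * c for (a, _, _), (c, _, _) in zip(x_list, y_list))
--     tws = [aw + cw for (_, aw, _), (_, cw, _) in zip(x_list, y_list)]
--     word = max([n] + [t + k for t, k in zip(tws, range(n, 0, -1))])
--     frac = max([0] + [af + cf for (_, _, af), (_, _, cf) in zip(x_list, y_list)])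
--     return (mac, word, frac)
-- ===== Notes on version B (the rewrite author's own statement) =====
-- stated objective: alternative
-- what changed: A's fused indexed loop carrying three accumulators is replaced by staged zip-based reductions, with the sequential word_length recurrence max(t_i, w)+1 replaced by its closed form max(n, max_i(t_i + n - i)) computed by zipping against the descending offsets range(n,0,-1).
import Mathlib
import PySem

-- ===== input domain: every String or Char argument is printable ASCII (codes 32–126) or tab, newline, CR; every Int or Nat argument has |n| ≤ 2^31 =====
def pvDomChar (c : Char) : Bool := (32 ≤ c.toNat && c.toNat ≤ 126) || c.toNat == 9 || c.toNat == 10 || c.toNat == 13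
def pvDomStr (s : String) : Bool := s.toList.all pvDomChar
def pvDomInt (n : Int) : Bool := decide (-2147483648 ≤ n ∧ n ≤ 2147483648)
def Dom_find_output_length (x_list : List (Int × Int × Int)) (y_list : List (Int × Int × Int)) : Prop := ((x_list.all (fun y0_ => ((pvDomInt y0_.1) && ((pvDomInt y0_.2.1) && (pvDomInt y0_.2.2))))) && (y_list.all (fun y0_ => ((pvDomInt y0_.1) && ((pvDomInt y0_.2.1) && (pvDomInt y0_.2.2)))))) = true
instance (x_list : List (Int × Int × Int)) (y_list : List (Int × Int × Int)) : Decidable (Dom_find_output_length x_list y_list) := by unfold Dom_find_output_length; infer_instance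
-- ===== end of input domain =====

-- B replaces A's fused indexed loop by staged zip-based reductions, with the
-- sequential word_length recurrence replaced by its closed form
-- max(n, max_i(t_i + n - i)) using a descending offset range; alternative
-- decomposition, same O(n) cost.


-- ===== PORT A =====
-- A: one pass over range(len(x_list)) carrying (mac, word_length, fractional_length).
-- Indexing x_list[i] / y_list[i] is in range for all admitted inputs (Pre_ below),
-- so it is ported with getD, which agrees with Python indexing there.
def find_output_length (x_list : List (Int × Int × Int)) (y_list : List (Int × Int × Int)) : Int × Int × Int :=
  (List.range x_list.length).foldl
    (fun s i =>
      (s.1 + (x_list.getD i (0,0,0)).1 * (y_list.getD i (0,0,0)).1,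
       max ((x_list.getD i (0,0,0)).2.1 + (y_list.getD i (0,0,0)).2.1) s.2.1 + 1,
       max ((x_list.getD i (0,0,0)).2.2 + (y_list.getD i (0,0,0)).2.2) s.2.2))
    ((0 : Int), (0 : Int), (0 : Int))

-- ===== PORT B =====
-- B: staged zip-based reductions; word length by the closed form, pairing the
-- summed word lengths with the descending offsets range(n, 0, -1).
def find_output_length_alt (x_list : List (Int × Int × Int)) (y_list : List (Int × Int × Int)) : Int × Int × Int :=
  let n := x_list.length
  let mac := (List.zipWith (fun a c => a.1 * c.1) x_list y_list).sum
  let tws := List.zipWith (fun a c => a.2.1 + c.2.1) x_list y_list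
  let word := (List.zipWith (fun t k => t + k) tws
      ((List.range n).reverse.map (fun k : Nat => ((k : Int) + 1)))).foldl max (n : Int)
  let frac := (List.zipWith (fun a c => a.2.2 + c.2.2) x_list y_list).foldl max 0
  (mac, word, frac)

-- ===== PRECONDITION & SPEC =====
-- Pre_ excludes exactly the inputs where Python A raises IndexError:
-- y_list shorter than x_list.
def Pre_find_output_length (x_list : List (Int × Int × Int)) (y_list : List (Int × Int × Int)) : Prop :=
  x_list.length ≤ y_list.length
instance (x_list : List (Int × Int × Int)) (y_list : List (Int × Int × Int)) : Decidable (Pre_find_output_length x_list y_list) := by unfold Pre_find_output_length; infer_instance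

def pvWitness_find_output_length : (List (Int × Int × Int)) × (List (Int × Int × Int)) :=
  ([(2, 3, 1), (-1, 2, 4)], [(5, 1, 0), (7, 6, 2)])

def Spec_find_output_length (x_list : List (Int × Int × Int)) (y_list : List (Int × Int × Int)) (out : Int × Int × Int) : Prop := out = find_output_length_alt x_list y_list
instance (x_list : List (Int × Int × Int)) (y_list : List (Int × Int × Int)) (out : Int × Int × Int) : Decidable (Spec_find_output_length x_list y_list out) := by unfold Spec_find_output_length; infer_instance

-- ===== CLAIM (what is proved, stated in full; the proofs are below) =====
def Claim_equal_find_output_length : Prop := ∀ (x_list : List (Int × Int × Int)) (y_list : List (Int × Int × Int)), Dom_find_output_length x_list y_list → Pre_find_output_length x_list y_list → Spec_find_output_length x_list y_list (find_output_length x_list y_list)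
-- ===== LEMMAS AND PROOFS =====

-- foldl max commutes with adding 1 to the seed and to every element
theorem pv_foldl_max_shift (l : List Int) (a : Int) :
    (l.map (· + 1)).foldl max (a + 1) = l.foldl max a + 1 := by
  induction l generalizing a with
  | nil => simp
  | cons h t ih =>
      simp only [List.map_cons, List.foldl_cons]
      rw [max_add_add_right]
      exact ih (max a h)

-- A's fused fold equals three range-indexed reductions, for any per-index data
theorem pv_main (p tw tf : Nat → Int) (n : Nat) :
    (List.range n).foldl
      (fun (s : Int × Int × Int) i => (s.1 + p i, max (tw i) s.2.1 + 1, max (tf i) s.2.2))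
      ((0 : Int), (0 : Int), (0 : Int))
    = (((List.range n).map p).sum,
       ((List.range n).map (fun i => tw i + ((n : Int) - (i : Int)))).foldl max (n : Int),
       ((List.range n).map tf).foldl max 0) := by
  induction n with
  | zero => simp
  | succ n ih =>
      rw [List.range_succ]
      simp only [List.foldl_append, List.foldl_cons, List.foldl_nil,
        List.map_append, List.map_cons, List.map_nil, List.sum_append, ih]
      refine Prod.ext (by simp) (Prod.ext ?_ ?_)
      · show max (tw n) _ + 1 = _
        have hcast : ((n + 1 : Nat) : Int) = (n : Int) + 1 := by push_cast; ring
        have hmap : (List.range n).map (fun i => tw i + (((n + 1 : Nat) : Int) - (i : Int)))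
            = ((List.range n).map (fun i => tw i + ((n : Int) - (i : Int)))).map (· + 1) := by
          simp only [List.map_map]
          refine List.map_congr_left (fun i _ => ?_)
          simp only [Function.comp]
          push_cast; ring
        rw [hmap, hcast, pv_foldl_max_shift]
        dsimp only
        omega
      · show max (tf n) _ = _
        simp [max_comm]

-- zipWith over lists with x no longer than y equals a map over range-indexed getD's
theorem pv_zip_eq_map {α β γ : Type} (f : α → β → γ) (x : List α) (y : List β)
    (d : α) (e : β) (h : x.length ≤ y.length) :
    List.zipWith f x y = (List.range x.length).map (fun i => f (x.getD i d) (y.getD i e)) := by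
  apply List.ext_getElem
  · simp [List.length_zipWith]; omega
  · intro i h1 h2
    rw [List.length_zipWith] at h1
    have hx : i < x.length := lt_of_lt_of_le h1 (min_le_left _ _)
    have hy : i < y.length := lt_of_lt_of_le hx h
    simp [List.getElem_zipWith, List.getD_eq_getElem?_getD, hx, hy]

-- pairing a length-n list with the descending offsets range(n,0,-1) equals the
-- map over range-indexed entries with offset n - i
theorem pv_word_zip (tws : List Int) (n : Nat) (h : tws.length = n) :
    List.zipWith (fun t k => t + k) tws ((List.range n).reverse.map (fun k : Nat => ((k : Int) + 1)))
    = (List.range n).map (fun i => tws.getD i 0 + ((n : Int) - (i : Int))) := by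
  apply List.ext_getElem
  · simp [List.length_zipWith, h]
  · intro i h1 h2
    have hi : i < n := by simpa [List.length_zipWith, h] using h1
    rw [List.getElem_zipWith, List.getElem_map, List.getElem_map, List.getElem_range,
        List.getElem_reverse, List.getElem_range,
        List.getD_eq_getElem?_getD, List.getElem?_eq_getElem (h ▸ hi)]
    simp only [Option.getD_some, List.length_range]
    omega

-- ===== VERDICT (by name: the statement is the Claim_ definition above) =====
theorem find_output_length_spec : Claim_equal_find_output_length := by
  intro x_list y_list _ hpre
  show find_output_length x_list y_list = find_output_length_alt x_list y_list
  unfold find_output_length find_output_length_alt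
  dsimp only
  rw [pv_main, pv_zip_eq_map _ x_list y_list (0,0,0) (0,0,0) hpre,
      pv_zip_eq_map _ x_list y_list (0,0,0) (0,0,0) hpre,
      pv_zip_eq_map _ x_list y_list (0,0,0) (0,0,0) hpre,
      pv_word_zip _ x_list.length (by simp)]
  refine Prod.ext rfl (Prod.ext ?_ rfl)
  show List.foldl max _ _ = List.foldl max _ _
  congr 1
  refine List.map_congr_left (fun i hi => ?_)
  have hi' : i < x_list.length := List.mem_range.mp hi
  simp [List.getD_eq_getElem?_getD, hi']
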